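-- pv_equiv track=rewrite | github.com/AnonymousPaperRe/CLAD | CLAD/utils/ner_functions.py | nodelabelextract
-- ===== SOURCE A (Python) =====
-- def invert_label_to_names(label_to_names):
--     """
--     Input:
--         { 'Disease': ['allergic rhinitis', ...],
--           'Compound': ['Pseudoephedrine', ...], ... }
--
--     Output:
--         names: list of all instance strings
--         name2label: map from instance string -> label
--     """
--     name2label = {}
--     names = []
--
--     for label, name_list in label_to_names.items():
--         for n in name_list:
--             if n not in name2label:
--                 name2label[n] = label
--                 names.append(n)
--
--     return names, name2label
--
-- def nodelabelextract(label_dict, matchedlist):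
--     """
--     Input:
--         label_dict: label -> names mapping (from JSON)
--         matchedlist: ['C2CD5', 'Niclosamide', ...]
--
--     Output:
--         [('Gene','C2CD5'), ('Compound','Niclosamide'), ...]
--     """
--     # Correct unpacking of the tuple
--     names, name2label = invert_label_to_names(label_dict)
--
--     node_instance_pair = []
--
--     if matchedlist:
--         for instance in matchedlist:
--             if instance in name2label:
--                 node_label = name2label[instance]
--                 node_instance_pair.append((node_label, instance))
--             else:
--                 # optional: handle unknown instances gracefully
--                 node_instance_pair.append(("Unknown", instance))
--
--     return node_instance_pair
-- ===== SOURCE B (Python) =====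
-- def nodelabelextract(label_dict, matchedlist):
--     if not matchedlist:
--         return []
--     pairs = []
--     for instance in matchedlist:
--         for label, names in label_dict.items():
--             if instance in names:
--                 pairs.append((label, instance))
--                 break
--         else:
--             pairs.append(("Unknown", instance))
--     return pairs
-- ===== Notes on version B (the rewrite author's own statement) =====
-- stated objective: alternative
-- what changed: B drops the invert_label_to_names name->label index entirely: for each matched instance it scans label_dict.items() in insertion order and takes the first label whose name list contains the instance (break), falling back to ('Unknown', instance); first-occurrence-wins is preserved by the scan order.
import Mathlib
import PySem

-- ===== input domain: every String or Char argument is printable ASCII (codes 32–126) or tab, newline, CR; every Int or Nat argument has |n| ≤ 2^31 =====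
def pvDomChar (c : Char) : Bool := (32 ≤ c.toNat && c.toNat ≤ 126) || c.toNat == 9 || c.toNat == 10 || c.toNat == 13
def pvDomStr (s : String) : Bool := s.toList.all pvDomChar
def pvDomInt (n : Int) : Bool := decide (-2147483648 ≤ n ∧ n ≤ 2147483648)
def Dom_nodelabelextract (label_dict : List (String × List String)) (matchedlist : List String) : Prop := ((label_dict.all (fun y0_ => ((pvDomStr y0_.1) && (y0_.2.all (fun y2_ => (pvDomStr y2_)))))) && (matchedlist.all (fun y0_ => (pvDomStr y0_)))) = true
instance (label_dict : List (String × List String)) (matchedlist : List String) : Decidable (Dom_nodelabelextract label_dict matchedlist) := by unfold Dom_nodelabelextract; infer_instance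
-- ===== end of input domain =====

-- B replaces A's precomputed name->label index with a per-instance in-order scan of label_dict
-- (first label whose name list contains the instance wins); alternative decomposition, not faster.


-- ===== PORT A =====
-- invert_label_to_names: builds (names, name2label) by iterating label_dict.items(),
-- first occurrence of a name wins.
def pvInvertStep (label : String) (st : List String × PySem.Dict String String) (n : String) :
    List String × PySem.Dict String String :=
  if st.2.contains n then st else (st.1 ++ [n], st.2.insert n label)

def invert_label_to_names (label_to_names : List (String × List String)) :
    List String × PySem.Dict String String :=
  label_to_names.foldl (fun st p => p.2.foldl (pvInvertStep p.1) st) ([], PySem.Dict.empty)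

def nodelabelextract (label_dict : List (String × List String)) (matchedlist : List String) : List (String × String) :=
  -- the Python receives label_dict as a dict: dict construction from the pair list
  let inv := invert_label_to_names (PySem.Dict.ofList label_dict).items
  if matchedlist.isEmpty then []
  else matchedlist.foldl (fun acc instance_ =>
    match inv.2.get? instance_ with
    | some node_label => acc ++ [(node_label, instance_)]
    | none => acc ++ [("Unknown", instance_)]) []

-- ===== PORT B =====
def nodelabelextract_alt (label_dict : List (String × List String)) (matchedlist : List String) : List (String × String) :=
  let items := (PySem.Dict.ofList label_dict).items
  if matchedlist.isEmpty then []
  else matchedlist.map (fun instance_ =>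
    -- inner for-with-break over label_dict.items(): first pair whose name list contains instance_
    match items.find? (fun p => p.2.contains instance_) with
    | some p => (p.1, instance_)
    | none => ("Unknown", instance_))

-- ===== PRECONDITION & SPEC =====
def Spec_nodelabelextract (label_dict : List (String × List String)) (matchedlist : List String) (out : List (String × String)) : Prop := out = nodelabelextract_alt label_dict matchedlist
instance (label_dict : List (String × List String)) (matchedlist : List String) (out : List (String × String)) : Decidable (Spec_nodelabelextract label_dict matchedlist out) := by unfold Spec_nodelabelextract; infer_instance

-- ===== CLAIM (what is proved, stated in full; the proofs are below) =====
def Claim_equal_nodelabelextract : Prop := ∀ (label_dict : List (String × List String)) (matchedlist : List String), Dom_nodelabelextract label_dict matchedlist → Spec_nodelabelextract label_dict matchedlist (nodelabelextract label_dict matchedlist)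

-- ===== LEMMAS AND PROOFS =====

-- inner loop of invert_label_to_names: what the dict says about `inst` afterwards
theorem pvInvert_inner (ns : List String) (label : String)
    (st : List String × PySem.Dict String String) (inst : String) :
    ((ns.foldl (pvInvertStep label) st).2).get? inst =
      match st.2.get? inst with
      | some v => some v
      | none => if ns.contains inst then some label else none := by
  induction ns generalizing st with
  | nil => cases h : st.2.get? inst <;> simp [h]
  | cons n ns ih =>
    simp only [List.foldl_cons, pvInvertStep]
    cases hc : st.2.contains n with
    | false =>
      simp only [Bool.false_eq_true, if_false]
      rw [ih]
      by_cases he : inst = n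
      · subst he
        have h0 : st.2.get? inst = none := by
          rw [PySem.Dict.get?_eq_none_iff_contains]; exact hc
        simp [h0, PySem.Dict.get?_insert_self]
      · rw [PySem.Dict.get?_insert_of_ne _ _ he]
        cases h : st.2.get? inst <;> simp [he]
    | true =>
      simp only [if_true]
      rw [ih]
      cases h : st.2.get? inst with
      | some v => simp
      | none =>
        have he : inst ≠ n := by
          intro e; subst e
          rw [PySem.Dict.contains_eq_isSome_get?, h] at hc; simp at hc
        simp [he]

-- outer loop: the first-wins dict lookup equals an in-order find? over the items
theorem pvInvert_outer (items : List (String × List String))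
    (st : List String × PySem.Dict String String) (inst : String) :
    ((items.foldl (fun st p => p.2.foldl (pvInvertStep p.1) st) st).2).get? inst =
      match st.2.get? inst with
      | some v => some v
      | none => (items.find? (fun p => p.2.contains inst)).map (·.1) := by
  induction items generalizing st with
  | nil => cases h : st.2.get? inst <;> simp [h]
  | cons p items ih =>
    simp only [List.foldl_cons, ih, pvInvert_inner]
    cases h : st.2.get? inst with
    | some v => simp
    | none =>
      by_cases hm : inst ∈ p.2
      · simp [hm]
      · simp [hm]

theorem pvName2label_eq (items : List (String × List String)) (inst : String) :
    ((invert_label_to_names items).2).get? inst =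
      (items.find? (fun p => p.2.contains inst)).map (·.1) := by
  simp [invert_label_to_names, pvInvert_outer]

theorem pvLoop (items : List (String × List String)) (ml : List String)
    (acc : List (String × String)) :
    ml.foldl (fun acc instance_ =>
      match (invert_label_to_names items).2.get? instance_ with
      | some node_label => acc ++ [(node_label, instance_)]
      | none => acc ++ [("Unknown", instance_)]) acc
    = acc ++ ml.map (fun instance_ =>
      match items.find? (fun p => p.2.contains instance_) with
      | some p => (p.1, instance_)
      | none => ("Unknown", instance_)) := by
  induction ml generalizing acc with
  | nil => simp
  | cons i ml ih =>
    simp only [List.foldl_cons, List.map_cons]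
    cases hf : items.find? (fun p => p.2.contains i) with
    | none =>
      have hg : (invert_label_to_names items).2.get? i = none := by
        rw [pvName2label_eq, hf]; rfl
      simp [hg, ih]
    | some p =>
      have hg : (invert_label_to_names items).2.get? i = some p.1 := by
        rw [pvName2label_eq, hf]; rfl
      simp [hg, ih]

-- ===== VERDICT (by name: the statement is the Claim_ definition above) =====
theorem nodelabelextract_spec : Claim_equal_nodelabelextract := by
  intro label_dict matchedlist _
  unfold Spec_nodelabelextract nodelabelextract nodelabelextract_alt
  by_cases hml : matchedlist.isEmpty = true <;> simp [hml, pvLoop]
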